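-- pv_equiv track=rewrite | github.com/trnamanh12/pdftomarkdown | src/pdftomarkdown/backends/marker.py | _split_page_numbers
-- ===== SOURCE A (Python) =====
-- from typing import Sequence
--
-- def _split_page_numbers(page_numbers: Sequence[int], chunk_count: int) -> list[list[int]]:
--     if not page_numbers:
--         return []
--     chunk_count = max(1, min(chunk_count, len(page_numbers)))
--     chunk_size, remainder = divmod(len(page_numbers), chunk_count)
--     chunks: list[list[int]] = []
--     start = 0
--     for chunk_index in range(chunk_count):
--         stop = start + chunk_size + (1 if chunk_index < remainder else 0)
--         chunks.append(list(page_numbers[start:stop]))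
--         start = stop
--     return [chunk for chunk in chunks if chunk]
-- ===== SOURCE B (Python) =====
-- def _split_page_numbers(page_numbers, chunk_count):
--     if not page_numbers:
--         return []
--     n = len(page_numbers)
--     k = max(1, min(chunk_count, n))
--     q, r = divmod(n, k)
--     sizes = [q + 1 if i < r else q for i in range(k)]
--     it = iter(page_numbers)
--     return [[next(it) for _ in range(s)] for s in sizes]
-- ===== Notes on version B (the rewrite author's own statement) =====
-- stated objective: alternative
-- what changed: B first computes the full list of chunk sizes (front-loading the remainder), then carves the sequence by sequentially consuming an iterator size-by-size, instead of A's running start/stop index arithmetic with slices plus a trailing empty-chunk filter.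
import Mathlib
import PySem

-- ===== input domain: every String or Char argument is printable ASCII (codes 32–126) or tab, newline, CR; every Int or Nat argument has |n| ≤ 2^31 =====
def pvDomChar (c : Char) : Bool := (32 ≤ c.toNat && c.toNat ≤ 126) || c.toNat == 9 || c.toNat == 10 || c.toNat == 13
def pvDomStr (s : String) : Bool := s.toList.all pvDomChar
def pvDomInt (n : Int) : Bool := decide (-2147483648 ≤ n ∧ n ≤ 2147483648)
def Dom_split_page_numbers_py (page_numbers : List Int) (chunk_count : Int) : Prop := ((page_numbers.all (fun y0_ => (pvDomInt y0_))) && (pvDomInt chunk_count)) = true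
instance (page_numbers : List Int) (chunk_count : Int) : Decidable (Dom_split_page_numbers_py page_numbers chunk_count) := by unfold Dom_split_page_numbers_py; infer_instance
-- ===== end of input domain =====

-- B replaces A's running start/stop index arithmetic (plus trailing empty-chunk filter) by a
-- sizes pass followed by sequential take/drop carving of the sequence (objective: alternative).

-- ===== PORT A =====
def split_page_numbers_py (page_numbers : List Int) (chunk_count : Int) : List (List Int) :=
  if page_numbers = [] then []
  else
    let n : Int := (page_numbers.length : Int)
    let cc : Int := max 1 (min chunk_count n)
    let chunk_size : Int := PySem.Int.floordiv n cc
    let remainder : Int := PySem.Int.mod n cc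
    let st := (PySem.List.pyRange 0 cc 1).foldl
      (fun (st : List (List Int) × Int) chunk_index =>
        let stop := st.2 + chunk_size + (if chunk_index < remainder then 1 else 0)
        (st.1 ++ [PySem.List.slice page_numbers (some st.2) (some stop)], stop))
      ([], 0)
    st.1.filter (fun c => decide (c ≠ []))

-- ===== PORT B =====
-- [next(it) for _ in range(s)]: take the next s elements from the iterator, returning
-- (chunk, remaining iterator state); the exhausted case is unreachable for our sizes
def pvNextChunk (s : Nat) (rest : List Int) : List Int × List Int :=
  match s, rest with
  | 0, rest => ([], rest)
  | _ + 1, [] => ([], [])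
  | m + 1, x :: xs =>
    let p := pvNextChunk m xs
    (x :: p.1, p.2)

def split_page_numbers_py_alt (page_numbers : List Int) (chunk_count : Int) : List (List Int) :=
  if page_numbers = [] then []
  else
    let n : Int := (page_numbers.length : Int)
    let k : Int := max 1 (min chunk_count n)
    let q : Int := PySem.Int.floordiv n k
    let r : Int := PySem.Int.mod n k
    let sizes : List Int := (PySem.List.pyRange 0 k 1).map (fun i => if i < r then q + 1 else q)
    (sizes.foldl
      (fun (st : List (List Int) × List Int) s =>
        let p := pvNextChunk s.toNat st.2
        (st.1 ++ [p.1], p.2))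
      ([], page_numbers)).1

-- ===== PRECONDITION & SPEC =====
def Spec_split_page_numbers_py (page_numbers : List Int) (chunk_count : Int) (out : List (List Int)) : Prop := out = split_page_numbers_py_alt page_numbers chunk_count
instance (page_numbers : List Int) (chunk_count : Int) (out : List (List Int)) : Decidable (Spec_split_page_numbers_py page_numbers chunk_count out) := by unfold Spec_split_page_numbers_py; infer_instance

-- ===== CLAIM (what is proved, stated in full; the proofs are below) =====
def Claim_equal_split_page_numbers_py : Prop := ∀ (page_numbers : List Int) (chunk_count : Int), Dom_split_page_numbers_py page_numbers chunk_count → Spec_split_page_numbers_py page_numbers chunk_count (split_page_numbers_py page_numbers chunk_count)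

-- ===== LEMMAS AND PROOFS =====

theorem pvNextChunk_eq_take_drop (s : Nat) : ∀ (rest : List Int),
    pvNextChunk s rest = (rest.take s, rest.drop s) := by
  induction s with
  | zero => intro rest; simp [pvNextChunk]
  | succ m ih =>
    intro rest
    cases rest with
    | nil => simp [pvNextChunk]
    | cons x xs => simp [pvNextChunk, ih xs]

-- A's fold (running start over xs) produces the same chunk list as B's fold (take/drop carving),
-- for any nonnegative sizes, no bounds needed (both sides clamp).
theorem pv_carve_eq (sizes : List Int) :
    ∀ (xs : List Int) (acc : List (List Int)) (start : Int),
      (∀ s ∈ sizes, 0 ≤ s) → 0 ≤ start →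
      (sizes.foldl
        (fun (st : List (List Int) × Int) s =>
          (st.1 ++ [PySem.List.slice xs (some st.2) (some (st.2 + s))], st.2 + s))
        (acc, start)).1
      = (sizes.foldl
        (fun (st : List (List Int) × List Int) s =>
          let p := pvNextChunk s.toNat st.2
          (st.1 ++ [p.1], p.2))
        (acc, xs.drop start.toNat)).1 := by
  induction sizes with
  | nil => intro xs acc start _ _; simp
  | cons s rest ih =>
    intro xs acc start hs hstart
    have hs0 : 0 ≤ s := hs s (by simp)
    simp only [List.foldl_cons]
    have h1 : PySem.List.slice xs (some start) (some (start + s))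
        = (xs.drop start.toNat).take s.toNat := by
      rw [PySem.List.slice_toNat xs hstart (by omega)]
      congr 1; omega
    have h3 : (xs.drop start.toNat).drop s.toNat = xs.drop (start + s).toNat := by
      rw [List.drop_drop]; congr 1; omega
    rw [h1, pvNextChunk_eq_take_drop, h3]
    exact ih xs (acc ++ [(xs.drop start.toNat).take s.toNat]) (start + s)
      (fun t ht => hs t (by simp [ht])) (by omega)

-- every chunk produced by B's carving fold is nonempty, provided each size is ≥ 1
-- and the sizes fit into the remaining list
theorem pv_carve_nonempty (sizes : List Int) :
    ∀ (rest : List Int) (acc : List (List Int)),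
      (∀ s ∈ sizes, 1 ≤ s) → sizes.sum ≤ (rest.length : Int) →
      (∀ c ∈ acc, c ≠ []) →
      ∀ c ∈ (sizes.foldl
        (fun (st : List (List Int) × List Int) s =>
          let p := pvNextChunk s.toNat st.2
          (st.1 ++ [p.1], p.2))
        (acc, rest)).1, c ≠ [] := by
  induction sizes with
  | nil => intro rest acc _ _ hacc; simpa using hacc
  | cons s tail ih =>
    intro rest acc hs hsum hacc
    have hs1 : 1 ≤ s := hs s (by simp)
    have htail0 : 0 ≤ tail.sum := by
      have : ∀ t ∈ tail, 0 ≤ t := fun t ht => le_trans (by norm_num) (hs t (by simp [ht]))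
      exact List.sum_nonneg this
    have hlen : s + tail.sum ≤ (rest.length : Int) := by
      simpa using hsum
    simp only [List.foldl_cons]
    rw [pvNextChunk_eq_take_drop]
    refine ih _ _ (fun t ht => hs t (by simp [ht])) ?_ ?_
    · simp only [List.length_drop]
      omega
    · intro c hc
      rcases List.mem_append.1 hc with h | h
      · exact hacc c h
      · simp only [List.mem_singleton] at h
        subst h
        have : rest.take s.toNat ≠ [] := by
          have h1 : 1 ≤ rest.length := by omega
          have h2 : (rest.take s.toNat).length = min s.toNat rest.length := by simp
          intro hnil
          rw [hnil] at h2
          simp at h2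
          omega
        exact this

theorem pv_sizes_sum (k q r : Int) (hr0 : 0 ≤ r) (hrk : r ≤ k) :
    (((PySem.List.pyRange 0 k 1).map (fun i => if i < r then q + 1 else q)).sum)
      = k * q + r := by
  have hsplit := PySem.List.pyRange_one_append 0 r k hr0 hrk
  rw [hsplit, List.map_append, List.sum_append]
  have h1 : (PySem.List.pyRange 0 r 1).map (fun i => if i < r then q + 1 else q)
      = (PySem.List.pyRange 0 r 1).map (fun _ => q + 1) := by
    apply List.map_congr_left
    intro i hi
    have := (PySem.List.mem_pyRange_one).1 hi
    simp [this.2]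
  have h2 : (PySem.List.pyRange r k 1).map (fun i => if i < r then q + 1 else q)
      = (PySem.List.pyRange r k 1).map (fun _ => q) := by
    apply List.map_congr_left
    intro i hi
    have := (PySem.List.mem_pyRange_one).1 hi
    have : ¬ i < r := by omega
    simp [this]
  rw [h1, h2]
  have l1 : ((PySem.List.pyRange 0 r 1).map (fun _ => q + 1)).sum
      = ((PySem.List.pyRange 0 r 1).length : Int) * (q + 1) := by
    rw [List.map_const', List.sum_replicate, nsmul_eq_mul]
  have l2 : ((PySem.List.pyRange r k 1).map (fun _ => q)).sum
      = ((PySem.List.pyRange r k 1).length : Int) * q := by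
    rw [List.map_const', List.sum_replicate, nsmul_eq_mul]
  rw [l1, l2, PySem.List.length_pyRange_one, PySem.List.length_pyRange_one]
  have c1 : (((r - 0).toNat : Int)) = r := by omega
  have c2 : (((k - r).toNat : Int)) = k - r := by omega
  rw [c1, c2]
  ring

-- ===== VERDICT (by name: the statement is the Claim_ definition above) =====
theorem split_page_numbers_py_spec : Claim_equal_split_page_numbers_py := by
  intro xs chunk_count _
  unfold Spec_split_page_numbers_py split_page_numbers_py split_page_numbers_py_alt
  by_cases hnil : xs = []
  · simp [hnil]
  · simp only [if_neg hnil]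
    set n : Int := (xs.length : Int) with hn
    set k : Int := max 1 (min chunk_count n) with hk
    have hxslen : 1 ≤ n := by
      have : xs.length ≠ 0 := fun h => hnil (List.eq_nil_of_length_eq_zero h)
      omega
    have hk1 : 1 ≤ k := le_max_left _ _
    have hkn : k ≤ n := by
      rcases le_total 1 (min chunk_count n) with h | h
      · rw [hk, max_eq_right h]; exact min_le_right _ _
      · rw [hk, max_eq_left h]; exact hxslen
    set q : Int := PySem.Int.floordiv n k with hq
    set r : Int := PySem.Int.mod n k with hr
    have hkpos : 0 < k := by omega
    have hr0 : 0 ≤ r := PySem.Int.mod_nonneg n hkpos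
    have hrk : r < k := PySem.Int.mod_lt n hkpos
    have hiden : q * k + r = n := PySem.Int.floordiv_mul_add_mod n k
    have hq1 : 1 ≤ q := by
      rw [hq, PySem.Int.floordiv_eq_ediv_of_pos hkpos]
      exact (Int.le_ediv_iff_mul_le hkpos).2 (by omega)
    set sizes : List Int := (PySem.List.pyRange 0 k 1).map (fun i => if i < r then q + 1 else q)
      with hsizes
    -- rewrite A's fold over the range as a fold over sizes
    have hA : ((PySem.List.pyRange 0 k 1).foldl
        (fun (st : List (List Int) × Int) chunk_index =>
          (st.1 ++ [PySem.List.slice xs (some st.2)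
             (some (st.2 + q + (if chunk_index < r then 1 else 0)))],
           st.2 + q + (if chunk_index < r then 1 else 0)))
        ([], 0))
        = (sizes.foldl
        (fun (st : List (List Int) × Int) s =>
          (st.1 ++ [PySem.List.slice xs (some st.2) (some (st.2 + s))], st.2 + s))
        ([], 0)) := by
      rw [hsizes, List.foldl_map]
      congr 1
      funext st i
      by_cases h : i < r <;> simp [h, add_assoc]
    have hsge : ∀ s ∈ sizes, 1 ≤ s := by
      intro s hs
      rw [hsizes] at hs
      rcases List.mem_map.1 hs with ⟨i, _, hi⟩
      by_cases h : i < r <;> simp [h] at hi <;> omega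
    have hsum : sizes.sum = n := by
      rw [hsizes, pv_sizes_sum k q r hr0 (by omega)]
      linarith [hiden]
    have hcarve := pv_carve_eq sizes xs [] 0
      (fun s hs => le_trans (by norm_num) (hsge s hs)) le_rfl
    simp only [Int.toNat_zero, List.drop_zero] at hcarve
    have hne := pv_carve_nonempty sizes xs []
      hsge (by rw [hsum]) (by simp)
    rw [hA, hcarve]
    exact List.filter_eq_self.2 (fun c hc => decide_eq_true (hne c hc))
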